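-- pv_equiv track=rewrite | github.com/EnesBaser/dost-ai-backend | learning_engine.py | generate_personalized_prompt
-- ===== SOURCE A (Python) =====
-- from typing import Dict, List, Optional
--
-- def generate_personalized_prompt(user_facts: List[Dict], message: str) -> str:
--     """Generate personalized system prompt based on user facts"""
--
--     # Group facts by category
--     facts_by_category = {}
--     for fact in user_facts:
--         category = fact['category']
--         if category not in facts_by_category:
--             facts_by_category[category] = []
--         facts_by_category[category].append(fact)
--
--     # Build context
--     context_parts = ["You are DostAI, a personalized AI companion."]
--
--     # Add user interests
--     if 'sports' in facts_by_category:
--         teams = [f['fact_key'].split(':')[1] for f in facts_by_category['sports'] if 'team:' in f['fact_key']]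
--         if teams:
--             context_parts.append(f"User is a fan of: {', '.join(teams)}.")
--
--     if 'cinema' in facts_by_category:
--         context_parts.append("User enjoys watching movies.")
--
--     if 'theater' in facts_by_category:
--         context_parts.append("User is interested in theater and performing arts.")
--
--     # Add location
--     if 'location' in facts_by_category:
--         locations = [f['fact_key'].split(':')[1] for f in facts_by_category['location']]
--         if locations:
--             context_parts.append(f"User is located in: {', '.join(locations)}.")
--
--     # Combine with original message
--     personalized_prompt = "\n".join(context_parts)
--     personalized_prompt += f"\n\nUser message: {message}"
--
--     return personalized_prompt
-- ===== SOURCE B (Python) =====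
-- def generate_personalized_prompt(user_facts, message):
--     """Generate personalized system prompt based on user facts"""
--
--     # Single pass: collect category presence, team names and locations at once.
--     present = set()
--     teams = []
--     locations = []
--     for fact in user_facts:
--         category = fact['category']
--         present.add(category)
--         if category == 'sports':
--             key = fact['fact_key']
--             if 'team:' in key:
--                 teams.append(key.split(':')[1])
--         elif category == 'location':
--             locations.append(fact['fact_key'].split(':')[1])
--
--     parts = ["You are DostAI, a personalized AI companion."]
--     if teams:
--         parts.append("User is a fan of: " + ", ".join(teams) + ".")
--     if 'cinema' in present:
--         parts.append("User enjoys watching movies.")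
--     if 'theater' in present:
--         parts.append("User is interested in theater and performing arts.")
--     if locations:
--         parts.append("User is located in: " + ", ".join(locations) + ".")
--     return "\n".join(parts) + "\n\nUser message: " + message
-- ===== Notes on version B (the rewrite author's own statement) =====
-- stated objective: alternative
-- what changed: Replaces A's group-by-category dict plus per-category list comprehensions with one single pass that simultaneously accumulates a category-presence set, the team names and the locations, so no per-category fact lists are ever materialized and the facts are traversed exactly once.
import Mathlib
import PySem

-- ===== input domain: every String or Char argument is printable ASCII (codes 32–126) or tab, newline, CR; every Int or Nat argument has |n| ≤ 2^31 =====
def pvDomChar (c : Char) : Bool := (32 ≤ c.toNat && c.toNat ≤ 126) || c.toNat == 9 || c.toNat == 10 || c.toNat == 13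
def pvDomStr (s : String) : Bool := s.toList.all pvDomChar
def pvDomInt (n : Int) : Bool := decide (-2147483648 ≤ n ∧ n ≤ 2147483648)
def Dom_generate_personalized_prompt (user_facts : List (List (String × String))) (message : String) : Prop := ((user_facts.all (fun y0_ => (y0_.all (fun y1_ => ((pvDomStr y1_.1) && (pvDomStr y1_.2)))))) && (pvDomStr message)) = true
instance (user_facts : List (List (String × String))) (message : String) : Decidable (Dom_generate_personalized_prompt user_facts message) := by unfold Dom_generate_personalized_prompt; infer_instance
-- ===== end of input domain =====

-- B replaces A's group-by-category dict and per-category comprehensions with ONE pass that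
-- simultaneously accumulates a presence set, the team names and the locations (objective: alternative).

-- shared trivial field accessors (fact['category'], fact['fact_key'], key.split(':')[1]);
-- getD with "" is total; Pre_ below excludes the inputs where Python raises KeyError/IndexError
def pvCat (f : List (String × String)) : String := PySem.Dict.getD (PySem.Dict.mk f) "category" ""
def pvKey (f : List (String × String)) : String := PySem.Dict.getD (PySem.Dict.mk f) "fact_key" ""
def pvSplit1 (k : String) : String :=
  (PySem.List.pyGet? ((PySem.Str.split? k ":").getD []) 1).getD ""

-- ===== PORT A =====
def generate_personalized_prompt (user_facts : List (List (String × String))) (message : String) : String :=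
  -- 'if category not in d: d[category] = []; d[category].append(fact)' is exactly
  -- Dict.modify category [] (· ++ [fact])  (PYSEM.md grouping pattern)
  let facts_by_category : PySem.Dict String (List (List (String × String))) :=
    user_facts.foldl (fun d f => PySem.Dict.modify d (pvCat f) [] (· ++ [f])) PySem.Dict.empty
  let context_parts : List String := ["You are DostAI, a personalized AI companion."]
  let context_parts :=
    if PySem.Dict.contains facts_by_category "sports" then
      let teams := ((PySem.Dict.getD facts_by_category "sports" []).filter
          (fun f => PySem.Str.isIn "team:" (pvKey f))).map (fun f => pvSplit1 (pvKey f))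
      if teams.isEmpty then context_parts
      else context_parts ++ ["User is a fan of: " ++ PySem.Str.join ", " teams ++ "."]
    else context_parts
  let context_parts :=
    if PySem.Dict.contains facts_by_category "cinema" then
      context_parts ++ ["User enjoys watching movies."] else context_parts
  let context_parts :=
    if PySem.Dict.contains facts_by_category "theater" then
      context_parts ++ ["User is interested in theater and performing arts."] else context_parts
  let context_parts :=
    if PySem.Dict.contains facts_by_category "location" then
      let locations := (PySem.Dict.getD facts_by_category "location" []).map (fun f => pvSplit1 (pvKey f))
      if locations.isEmpty then context_parts
      else context_parts ++ ["User is located in: " ++ PySem.Str.join ", " locations ++ "."]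
    else context_parts
  PySem.Str.join "\n" context_parts ++ "\n\nUser message: " ++ message

-- ===== PORT B =====
-- one loop body: update (present, teams, locations) from one fact
def pvStep (st : PySem.Set String × List String × List String) (f : List (String × String)) :
    PySem.Set String × List String × List String :=
  let category := pvCat f
  let present := PySem.Set.add st.1 category
  if category == "sports" then
    let key := pvKey f
    if PySem.Str.isIn "team:" key then (present, st.2.1 ++ [pvSplit1 key], st.2.2)
    else (present, st.2.1, st.2.2)
  else if category == "location" then (present, st.2.1, st.2.2 ++ [pvSplit1 (pvKey f)])
  else (present, st.2.1, st.2.2)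

def generate_personalized_prompt_alt (user_facts : List (List (String × String))) (message : String) : String :=
  let st := user_facts.foldl pvStep (PySem.Set.empty, [], [])
  let present := st.1
  let teams := st.2.1
  let locations := st.2.2
  let parts : List String := ["You are DostAI, a personalized AI companion."]
  let parts := if teams.isEmpty then parts
    else parts ++ ["User is a fan of: " ++ PySem.Str.join ", " teams ++ "."]
  let parts := if PySem.Set.contains present "cinema" then
    parts ++ ["User enjoys watching movies."] else parts
  let parts := if PySem.Set.contains present "theater" then
    parts ++ ["User is interested in theater and performing arts."] else parts
  let parts := if locations.isEmpty then parts
    else parts ++ ["User is located in: " ++ PySem.Str.join ", " locations ++ "."]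
  PySem.Str.join "\n" parts ++ "\n\nUser message: " ++ message

-- ===== PRECONDITION & SPEC =====
-- Pre_ excludes exactly the inputs where Python A raises: a fact without a 'category' key
-- (KeyError), a sports/location fact without a 'fact_key' key (KeyError), or a location
-- fact whose fact_key has no ':' (IndexError on split(':')[1]).
def Pre_generate_personalized_prompt (user_facts : List (List (String × String))) (message : String) : Prop :=
  ∀ f ∈ user_facts,
    PySem.Dict.contains (PySem.Dict.mk f) "category" = true ∧
    (pvCat f = "sports" ∨ pvCat f = "location" → PySem.Dict.contains (PySem.Dict.mk f) "fact_key" = true) ∧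
    (pvCat f = "location" → PySem.Str.isIn ":" (pvKey f) = true)
instance (user_facts : List (List (String × String))) (message : String) : Decidable (Pre_generate_personalized_prompt user_facts message) := by unfold Pre_generate_personalized_prompt; infer_instance

def pvWitness_generate_personalized_prompt : (List (List (String × String))) × String :=
  ([[("category", "sports"), ("fact_key", "team:Galatasaray")],
    [("category", "cinema"), ("fact_key", "genre:drama")]], "hello")

def Spec_generate_personalized_prompt (user_facts : List (List (String × String))) (message : String) (out : String) : Prop := out = generate_personalized_prompt_alt user_facts message
instance (user_facts : List (List (String × String))) (message : String) (out : String) : Decidable (Spec_generate_personalized_prompt user_facts message out) := by unfold Spec_generate_personalized_prompt; infer_instance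

-- ===== CLAIM (what is proved, stated in full; the proofs are below) =====
def Claim_equal_generate_personalized_prompt : Prop := ∀ (user_facts : List (List (String × String))) (message : String), Dom_generate_personalized_prompt user_facts message → Pre_generate_personalized_prompt user_facts message → Spec_generate_personalized_prompt user_facts message (generate_personalized_prompt user_facts message)

-- ===== LEMMAS AND PROOFS =====

-- B's single fold, characterized componentwise: presence set, teams, locations.
theorem pv_fold_char (ufs : List (List (String × String)))
    (s0 : PySem.Set String) (t0 l0 : List String) :
    ufs.foldl pvStep (s0, t0, l0) =
      (ufs.foldl (fun s f => PySem.Set.add s (pvCat f)) s0,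
       t0 ++ ((ufs.filter (fun f => pvCat f == "sports" && PySem.Str.isIn "team:" (pvKey f))).map
                (fun f => pvSplit1 (pvKey f))),
       l0 ++ ((ufs.filter (fun f => pvCat f == "location")).map (fun f => pvSplit1 (pvKey f)))) := by
  induction ufs generalizing s0 t0 l0 with
  | nil => simp
  | cons f rest ih =>
    by_cases hs : pvCat f = "sports"
    · by_cases ht : PySem.Str.isIn "team:" (pvKey f) = true
      · simp [PySem.Str.isIn] at ht
        have hstep : pvStep (s0, t0, l0) f
            = (PySem.Set.add s0 (pvCat f), t0 ++ [pvSplit1 (pvKey f)], l0) := by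
          simp [pvStep, hs, ht]
        rw [List.foldl_cons, hstep, ih]
        simp [List.filter_cons, hs, ht]
      · simp [PySem.Str.isIn] at ht
        have hstep : pvStep (s0, t0, l0) f = (PySem.Set.add s0 (pvCat f), t0, l0) := by
          simp [pvStep, hs, ht]
        rw [List.foldl_cons, hstep, ih]
        simp [List.filter_cons, hs, ht]
    · by_cases hl : pvCat f = "location"
      · have hstep : pvStep (s0, t0, l0) f
            = (PySem.Set.add s0 (pvCat f), t0, l0 ++ [pvSplit1 (pvKey f)]) := by
          simp [pvStep, hs, hl]
        rw [List.foldl_cons, hstep, ih]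
        simp [List.filter_cons, hs, hl]
      · have hstep : pvStep (s0, t0, l0) f = (PySem.Set.add s0 (pvCat f), t0, l0) := by
          simp [pvStep, hs, hl]
        rw [List.foldl_cons, hstep, ih]
        simp [List.filter_cons, hs, hl]

-- A's grouping dict, looked up at category c, is just the filtered input list.
theorem pv_getD_group (ufs : List (List (String × String))) (c : String) :
    PySem.Dict.getD (ufs.foldl (fun d f => PySem.Dict.modify d (pvCat f) [] (· ++ [f])) PySem.Dict.empty) c []
      = ufs.filter (fun f => pvCat f == c) := by
  have h := PySem.Dict.getD_foldl_modify_append (ufs.map (fun f => (pvCat f, f)))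
    (PySem.Dict.empty (κ := String) (ν := List (List (String × String)))) c
  rw [List.foldl_map] at h
  simpa [List.filter_map, List.map_map, Function.comp_def] using h

-- A's dict has key c iff B's presence set contains c.
theorem pv_contains_group (ufs : List (List (String × String))) (c : String) :
    PySem.Dict.contains (ufs.foldl (fun d f => PySem.Dict.modify d (pvCat f) [] (· ++ [f])) PySem.Dict.empty) c
      = PySem.Set.contains (ufs.foldl (fun s f => PySem.Set.add s (pvCat f)) PySem.Set.empty) c := by
  have hk := PySem.Dict.keys_foldl_modify_key ufs pvCat ([])
    (fun _ f => fun l => l ++ [f]) (PySem.Dict.empty)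
  rw [PySem.Dict.contains_eq_decide_mem_keys, hk, ← PySem.Set.update_map_eq_foldl_add]
  simp [PySem.Dict.keys_empty, PySem.Set.empty]

-- if the presence set misses c, no fact has category c
theorem pv_filter_nil_of_not_mem (ufs : List (List (String × String))) (c : String)
    (h : c ∉ ufs.foldl (fun s f => PySem.Set.add s (pvCat f)) ([] : List String))
    (p : List (String × String) → Bool) :
    ufs.filter (fun f => pvCat f == c && p f) = [] := by
  simp only [PySem.Set.mem_foldl_add, List.not_mem_nil, false_or,
    not_exists, not_and] at h
  refine List.filter_eq_nil_iff.mpr (fun f hf => ?_)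
  simp only [Bool.and_eq_true, beq_iff_eq, not_and]
  intro hc
  exact absurd hc.symm (h f hf)

-- ===== VERDICT (by name: the statement is the Claim_ definition above) =====
theorem generate_personalized_prompt_spec : Claim_equal_generate_personalized_prompt := by
  intro ufs msg _hd _hp
  unfold Spec_generate_personalized_prompt generate_personalized_prompt generate_personalized_prompt_alt
  rw [pv_fold_char]
  simp only [pv_getD_group, pv_contains_group, List.filter_filter, List.nil_append]
  have hsw : (fun a => PySem.Str.isIn "team:" (pvKey a) && (pvCat a == "sports"))
      = (fun f => (pvCat f == "sports") && PySem.Str.isIn "team:" (pvKey f)) := by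
    funext a; exact Bool.and_comm _ _
  rw [hsw]
  by_cases hs : "sports" ∈ ufs.foldl (fun s f => PySem.Set.add s (pvCat f)) ([] : List String)
  · by_cases hl : "location" ∈ ufs.foldl (fun s f => PySem.Set.add s (pvCat f)) ([] : List String)
    · simp [hs, hl]
    · have h1 := pv_filter_nil_of_not_mem ufs "location" hl (fun _ => true)
      simp at h1
      simp [hs, hl, h1]
      rw [if_pos h1]
  · have h0 := pv_filter_nil_of_not_mem ufs "sports" hs
      (fun f => PySem.Str.isIn "team:" (pvKey f))
    simp at h0
    by_cases hl : "location" ∈ ufs.foldl (fun s f => PySem.Set.add s (pvCat f)) ([] : List String)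
    · simp [hs, hl, h0]
      rw [if_pos h0]
      split_ifs <;> rfl
    · have h1 := pv_filter_nil_of_not_mem ufs "location" hl (fun _ => true)
      simp at h1
      simp [hs, hl, h0, h1]
      rw [if_pos h1, if_pos h0]
      split_ifs <;> rfl
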